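-- pv_equiv track=rewrite | github.com/jansnajder/advent-of-code-2021 | sw/day_14/polymers.py | calculate_elements
-- ===== SOURCE A (Python) =====
-- def calculate_elements(polymer_dict):
--     results = {}
--     for key, val in polymer_dict.items():
--         if key[0] in results:
--             results[key[0]] += val
--         else:
--             results[key[0]] = val
--
--     return results
-- ===== SOURCE B (Python) =====
-- def calculate_elements(polymer_dict):
--     items = list(polymer_dict.items())
--     firsts = list(dict.fromkeys(key[0] for key, _ in items))
--     return {c: sum(val for key, val in items if key[0] == c) for c in firsts}
-- ===== Notes on version B (the rewrite author's own statement) =====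
-- stated objective: alternative
-- what changed: Replaced A's single accumulating dict loop (check-membership, add-or-insert per item) by a two-pass decomposition: an ordered dedup of the keys' first characters, then one summation over the items per distinct first character.
-- outside the precondition, e.g. on calculate_elements({'': 1}): A raises IndexError, B raises IndexError
import Mathlib
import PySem

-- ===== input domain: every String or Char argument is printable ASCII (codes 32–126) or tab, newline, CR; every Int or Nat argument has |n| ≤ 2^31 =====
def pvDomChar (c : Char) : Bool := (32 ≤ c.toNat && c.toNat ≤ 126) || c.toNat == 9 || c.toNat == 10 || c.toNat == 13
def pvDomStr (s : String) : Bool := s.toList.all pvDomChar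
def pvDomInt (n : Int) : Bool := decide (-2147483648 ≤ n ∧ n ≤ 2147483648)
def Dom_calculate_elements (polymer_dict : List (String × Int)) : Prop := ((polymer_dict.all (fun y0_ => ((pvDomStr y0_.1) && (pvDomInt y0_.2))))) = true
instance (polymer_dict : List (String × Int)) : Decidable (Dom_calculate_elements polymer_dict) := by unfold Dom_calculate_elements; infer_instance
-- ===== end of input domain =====

-- B replaces A's single accumulating dict loop by a two-pass decomposition (ordered dedup of
-- first characters, then one summation per distinct first character); objective: alternative.

-- ===== PORT A =====
-- literal port of A: one pass, accumulating into a dict keyed by key[0]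
def calculate_elements (polymer_dict : List (String × Int)) : List (String × Int) :=
  (polymer_dict.foldl (fun (results : PySem.Dict String Int) kv =>
      match PySem.Str.pyGet? kv.1 0 with
      | none => results      -- key[0] raises IndexError in Python here; such inputs are outside Pre_
      | some c =>
          let k0 := String.ofList [c]
          if results.contains k0 then
            results.modify k0 0 (· + kv.2)
          else
            results.insert k0 kv.2) PySem.Dict.empty).items

-- ===== PORT B =====
-- B-side helper: key[0] as a one-character string ("" only outside Pre_, where Python raises)
def pvFirst (s : String) : String :=
  match PySem.Str.pyGet? s 0 with
  | some c => String.ofList [c]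
  | none => ""

def calculate_elements_alt (polymer_dict : List (String × Int)) : List (String × Int) :=
  let firsts := PySem.List.dedup (polymer_dict.map (fun kv => pvFirst kv.1))
  firsts.map (fun c =>
    (c, ((polymer_dict.filter (fun kv => pvFirst kv.1 == c)).map (·.2)).sum))

-- ===== PRECONDITION & SPEC =====
-- Pre_ excludes inputs containing an empty-string key, on which Python A (key[0]) raises IndexError.
def Pre_calculate_elements (polymer_dict : List (String × Int)) : Prop :=
  ∀ kv ∈ polymer_dict, kv.1 ≠ ""
instance (polymer_dict : List (String × Int)) : Decidable (Pre_calculate_elements polymer_dict) := by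
  unfold Pre_calculate_elements; infer_instance
def pvWitness_calculate_elements : (List (String × Int)) := [("AB", 3), ("AC", -2), ("BC", 5)]

def Spec_calculate_elements (polymer_dict : List (String × Int)) (out : List (String × Int)) : Prop := out = calculate_elements_alt polymer_dict
instance (polymer_dict : List (String × Int)) (out : List (String × Int)) : Decidable (Spec_calculate_elements polymer_dict out) := by unfold Spec_calculate_elements; infer_instance

-- ===== CLAIM (what is proved, stated in full; the proofs are below) =====
def Claim_equal_calculate_elements : Prop := ∀ (polymer_dict : List (String × Int)), Dom_calculate_elements polymer_dict → Pre_calculate_elements polymer_dict → Spec_calculate_elements polymer_dict (calculate_elements polymer_dict)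

-- ===== LEMMAS AND PROOFS =====

-- the canonical insert-shaped body both loop shapes reduce to
def pvBody (d : PySem.Dict String Int) (kv : String × Int) : PySem.Dict String Int :=
  d.insert (pvFirst kv.1) (d.getD (pvFirst kv.1) 0 + kv.2)

theorem pvFirst_of_cons {s : String} {c : Char} {t : List Char} (h : s.toList = c :: t) :
    pvFirst s = String.ofList [c] := by
  unfold pvFirst
  simp [h]

theorem foldA_eq_foldBody (l : List (String × Int)) (h : ∀ kv ∈ l, kv.1 ≠ "") :
    l.foldl (fun (results : PySem.Dict String Int) kv =>
      match PySem.Str.pyGet? kv.1 0 with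
      | none => results
      | some c =>
          let k0 := String.ofList [c]
          if results.contains k0 then
            results.modify k0 0 (· + kv.2)
          else
            results.insert k0 kv.2) PySem.Dict.empty
    = l.foldl pvBody PySem.Dict.empty := by
  apply PySem.List.foldl_congr_mem
  intro acc kv hmem
  have hne : kv.1 ≠ "" := h kv hmem
  cases hlist : kv.1.toList with
  | nil =>
      exact absurd (by simpa using congrArg String.ofList hlist) hne
  | cons c t =>
      have hsome : PySem.Str.pyGet? kv.1 0 = some c := by simp [hlist]
      have hk : pvFirst kv.1 = String.ofList [c] := pvFirst_of_cons hlist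
      simp only [hsome]
      unfold pvBody
      rw [hk]
      by_cases hc : acc.contains (String.ofList [c])
      · rw [if_pos hc]; rfl
      · rw [if_neg hc, PySem.Dict.getD_of_not_contains _ _ (by simpa using hc), zero_add]

theorem getD_foldBody (l : List (String × Int)) (d : PySem.Dict String Int) (c : String) :
    (l.foldl pvBody d).getD c 0
      = d.getD c 0 + ((l.filter (fun kv => pvFirst kv.1 == c)).map (·.2)).sum := by
  induction l generalizing d with
  | nil => simp
  | cons kv l ih =>
      simp only [List.foldl_cons, List.filter_cons]
      rw [ih]
      unfold pvBody
      by_cases hc : pvFirst kv.1 = c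
      · subst hc
        rw [PySem.Dict.getD_insert_self]
        simp [List.map_cons]
        omega
      · rw [PySem.Dict.getD_insert_of_ne _ _ _ (fun h => hc h.symm)]
        simp [hc]

theorem keys_foldBody (l : List (String × Int)) :
    (l.foldl pvBody PySem.Dict.empty).keys
      = PySem.List.dedup (l.map (fun kv => pvFirst kv.1)) := by
  unfold pvBody
  rw [PySem.Dict.keys_foldl_insert_key]
  simp [PySem.Dict.keys_empty, PySem.Set.update_nil_left]

theorem nodup_keys_foldBody (l : List (String × Int)) :
    (l.foldl pvBody PySem.Dict.empty).keys.Nodup := by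
  unfold pvBody
  exact PySem.Dict.nodup_keys_foldl_insert_key l _ _ _ PySem.Dict.nodup_keys_empty

-- ===== VERDICT (by name: the statement is the Claim_ definition above) =====
theorem calculate_elements_spec : Claim_equal_calculate_elements := by
  intro pd _ hpre
  unfold Spec_calculate_elements calculate_elements calculate_elements_alt
  rw [foldA_eq_foldBody pd hpre]
  rw [PySem.Dict.items_eq_map_keys _ (nodup_keys_foldBody pd) 0]
  rw [keys_foldBody]
  refine List.map_congr_left ?_
  intro c _
  rw [getD_foldBody]
  simp
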